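-- pv_equiv track=rewrite | github.com/BadWolf1509/licitafacil | backend/services/matching_service.py | _check_exclusive_qualifiers
-- ===== SOURCE A (Python) =====
-- from typing import Any, Dict, List, Optional, Set
--
-- EXCLUSIVE_QUALIFIER_GROUPS: List[Set[str]] = [
--     {"HORIZONTAL", "VERTICAL"},
--     {"INTERNO", "INTERNA", "EXTERNA", "EXTERNO"},
--     {"SUPERIOR", "INFERIOR"},
--     {"VEDACAO", "ESTRUTURAL"},
--     {"SIMPLES", "ARMADO", "PROTENDIDO"},
--     {"MACICA", "NERVURADA", "TRELICADA"},
--     {"MANUAL", "MECANICO", "MECANIZADA", "MECANIZADO"},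
--     {"SOLDAVEL", "ROSCAVEL"},
--     {"ESCAVACAO", "ATERRO"},
--     {"FLEXIVEL", "RIGIDO"},
--     {"PVA", "ACRILICO"},
--     {"PISO", "PAREDE", "TETO", "FORRO", "MURO"},
-- ]
--
-- def _check_exclusive_qualifiers(req_keywords: Set[str], serv_keywords: Set[str]) -> bool:
--     """
--     Verifica se o serviço não contradiz a exigência em qualificadores exclusivos.
--
--     Se a exigência menciona VERTICAL e o serviço menciona HORIZONTAL,
--     são serviços incompatíveis e o match deve ser rejeitado.
--
--     Returns:
--         True se compatível, False se contraditório.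
--     """
--     for group in EXCLUSIVE_QUALIFIER_GROUPS:
--         req_in_group = req_keywords & group
--         serv_in_group = serv_keywords & group
--         # Se a exigência menciona múltiplos qualificadores do grupo
--         # (ex: "flexivel e/ou rigido"), qualquer um é aceitável.
--         if len(req_in_group) > 1:
--             continue
--         # Se ambos têm qualificadores, devem ter pelo menos um em comum.
--         # Ex: req={PISO} serv={PISO, PAREDE} → interseção {PISO} → OK
--         # Ex: req={PISO} serv={PAREDE} → interseção vazia → bloqueado
--         if req_in_group and serv_in_group and not (req_in_group & serv_in_group):
--             return False
--     return True
-- ===== SOURCE B (Python) =====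
-- from typing import Any, Dict, List, Optional, Set
--
-- EXCLUSIVE_QUALIFIER_GROUPS: List[Set[str]] = [
--     {"HORIZONTAL", "VERTICAL"},
--     {"INTERNO", "INTERNA", "EXTERNA", "EXTERNO"},
--     {"SUPERIOR", "INFERIOR"},
--     {"VEDACAO", "ESTRUTURAL"},
--     {"SIMPLES", "ARMADO", "PROTENDIDO"},
--     {"MACICA", "NERVURADA", "TRELICADA"},
--     {"MANUAL", "MECANICO", "MECANIZADA", "MECANIZADO"},
--     {"SOLDAVEL", "ROSCAVEL"},
--     {"ESCAVACAO", "ATERRO"},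
--     {"FLEXIVEL", "RIGIDO"},
--     {"PVA", "ACRILICO"},
--     {"PISO", "PAREDE", "TETO", "FORRO", "MURO"},
-- ]
--
-- # Flat index: qualifier keyword -> index of its (unique) exclusive group.
-- KW2GROUP: Dict[str, int] = {
--     kw: i for i, group in enumerate(EXCLUSIVE_QUALIFIER_GROUPS) for kw in group
-- }
--
-- def _check_exclusive_qualifiers(req_keywords: Set[str], serv_keywords: Set[str]) -> bool:
--     """Keyword-driven check: instead of scanning every exclusive group, bucket the
--     keywords by group via the KW2GROUP index and judge each requirement keyword."""
--     serv_groups = {KW2GROUP[w] for w in serv_keywords if w in KW2GROUP}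
--     req_groups = [KW2GROUP[w] for w in req_keywords if w in KW2GROUP]
--     req_counts: Dict[int, int] = {}
--     for g in req_groups:
--         req_counts[g] = req_counts.get(g, 0) + 1
--     for w in req_keywords:
--         g = KW2GROUP.get(w)
--         if g is not None and req_counts[g] == 1 and g in serv_groups and w not in serv_keywords:
--             return False
--     return True
-- ===== Notes on version B (the rewrite author's own statement) =====
-- stated objective: alternative
-- what changed: Replaces A's scan over the 12 exclusive groups (a set intersection per group) by a keyword-driven pass: a precomputed keyword-to-group-index map (KW2GROUP), a set of group indices seen on the service side, per-group counts of requirement qualifiers, and a single judgement per requirement keyword.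
import Mathlib
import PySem

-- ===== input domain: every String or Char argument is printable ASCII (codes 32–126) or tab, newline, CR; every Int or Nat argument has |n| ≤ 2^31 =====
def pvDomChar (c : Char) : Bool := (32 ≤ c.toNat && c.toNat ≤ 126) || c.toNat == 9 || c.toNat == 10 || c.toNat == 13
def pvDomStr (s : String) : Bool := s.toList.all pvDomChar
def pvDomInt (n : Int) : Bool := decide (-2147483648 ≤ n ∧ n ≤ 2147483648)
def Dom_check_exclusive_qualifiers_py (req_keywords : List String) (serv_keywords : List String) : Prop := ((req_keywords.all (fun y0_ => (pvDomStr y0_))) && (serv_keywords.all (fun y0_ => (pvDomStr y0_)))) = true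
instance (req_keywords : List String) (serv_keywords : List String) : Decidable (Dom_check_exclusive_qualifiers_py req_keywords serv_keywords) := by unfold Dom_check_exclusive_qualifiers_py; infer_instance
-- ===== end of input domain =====

-- B replaces A's scan over the 12 exclusive groups by a per-keyword judgement driven by a
-- precomputed keyword→group-index map with group buckets/counts (objective: alternative, same cost).

set_option maxRecDepth 100000

-- ===== PORT A =====
def EXCLUSIVE_QUALIFIER_GROUPS : List (List String) := [
  ["HORIZONTAL", "VERTICAL"],
  ["INTERNO", "INTERNA", "EXTERNA", "EXTERNO"],
  ["SUPERIOR", "INFERIOR"],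
  ["VEDACAO", "ESTRUTURAL"],
  ["SIMPLES", "ARMADO", "PROTENDIDO"],
  ["MACICA", "NERVURADA", "TRELICADA"],
  ["MANUAL", "MECANICO", "MECANIZADA", "MECANIZADO"],
  ["SOLDAVEL", "ROSCAVEL"],
  ["ESCAVACAO", "ATERRO"],
  ["FLEXIVEL", "RIGIDO"],
  ["PVA", "ACRILICO"],
  ["PISO", "PAREDE", "TETO", "FORRO", "MURO"]]

-- the 'for group in EXCLUSIVE_QUALIFIER_GROUPS' loop with its early 'return False'
def pvCheckGroups (R S : PySem.Set String) : List (List String) → Bool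
  | [] => true
  | g :: rest =>
      let req_in_group := PySem.Set.inter R g
      let serv_in_group := PySem.Set.inter S g
      if 1 < req_in_group.length then pvCheckGroups R S rest
      else if !req_in_group.isEmpty && !serv_in_group.isEmpty &&
              (PySem.Set.inter req_in_group serv_in_group).isEmpty then false
      else pvCheckGroups R S rest

def check_exclusive_qualifiers_py (req_keywords : List String) (serv_keywords : List String) : Bool :=
  pvCheckGroups (PySem.Set.ofList req_keywords) (PySem.Set.ofList serv_keywords)
    EXCLUSIVE_QUALIFIER_GROUPS

-- ===== PORT B =====
-- KW2GROUP = {kw: i for i, group in enumerate(EXCLUSIVE_QUALIFIER_GROUPS) for kw in group}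
def KW2GROUP : PySem.Dict String Int :=
  (PySem.List.enumerate EXCLUSIVE_QUALIFIER_GROUPS).foldl
    (fun d p => p.2.foldl (fun d kw => d.insert kw p.1) d) (PySem.Dict.mk [])

def check_exclusive_qualifiers_py_alt (req_keywords : List String) (serv_keywords : List String) : Bool :=
  let R := PySem.Set.ofList req_keywords
  let S := PySem.Set.ofList serv_keywords
  let serv_groups : PySem.Set Int := PySem.Set.ofList (S.filterMap (fun w => KW2GROUP.get? w))
  let req_groups : List Int := R.filterMap (fun w => KW2GROUP.get? w)
  let req_counts : PySem.Dict Int Int :=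
    req_groups.foldl (fun d g => d.modify g 0 (· + 1)) (PySem.Dict.mk [])
  -- the 'for w in req_keywords' loop with its early 'return False' (result is order-independent)
  R.all (fun w =>
    match KW2GROUP.get? w with
    | none => true
    | some g => !(req_counts.getD g 0 == 1 && serv_groups.contains g && !(S.contains w)))

-- ===== PRECONDITION & SPEC =====
def Spec_check_exclusive_qualifiers_py (req_keywords : List String) (serv_keywords : List String) (out : Bool) : Prop := out = check_exclusive_qualifiers_py_alt req_keywords serv_keywords
instance (req_keywords : List String) (serv_keywords : List String) (out : Bool) : Decidable (Spec_check_exclusive_qualifiers_py req_keywords serv_keywords out) := by unfold Spec_check_exclusive_qualifiers_py; infer_instance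

-- ===== CLAIM (what is proved, stated in full; the proofs are below) =====
def Claim_equal_check_exclusive_qualifiers_py : Prop := ∀ (req_keywords : List String) (serv_keywords : List String), Dom_check_exclusive_qualifiers_py req_keywords serv_keywords → Spec_check_exclusive_qualifiers_py req_keywords serv_keywords (check_exclusive_qualifiers_py req_keywords serv_keywords)

-- ===== LEMMAS AND PROOFS =====

def pvEnum : List (Int × List String) := PySem.List.enumerate EXCLUSIVE_QUALIFIER_GROUPS

def okA (R S : PySem.Set String) (g : List String) : Bool :=
  if 1 < (PySem.Set.inter R g).length then true
  else !(!(PySem.Set.inter R g).isEmpty && !(PySem.Set.inter S g).isEmpty &&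
         (PySem.Set.inter (PySem.Set.inter R g) (PySem.Set.inter S g)).isEmpty)

def okB (R S : PySem.Set String) (w : String) : Bool :=
  match KW2GROUP.get? w with
  | none => true
  | some g => !((((R.filterMap (fun w => KW2GROUP.get? w)).foldl
        (fun d g => d.modify g 0 (· + 1)) (PySem.Dict.mk ([] : List (Int × Int)))).getD g 0 == 1)
      && (PySem.Set.ofList (S.filterMap (fun w => KW2GROUP.get? w))).contains g
      && !(S.contains w))

lemma checkGroups_eq_all (gs : List (List String)) (R S : PySem.Set String) :
    pvCheckGroups R S gs = gs.all (okA R S) := by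
  induction gs with
  | nil => rfl
  | cons g rest ih =>
      simp only [pvCheckGroups, List.all_cons, okA]
      split_ifs with h1 h2
      · simp [ih]
      · simp [h2]
      · simp [h2, ih]

lemma A_eq_all (req serv : List String) :
    check_exclusive_qualifiers_py req serv =
      pvEnum.all (fun p => okA (PySem.Set.ofList req) (PySem.Set.ofList serv) p.2) := by
  unfold check_exclusive_qualifiers_py
  rw [checkGroups_eq_all,
      show EXCLUSIVE_QUALIFIER_GROUPS = pvEnum.map Prod.snd from by decide, List.all_map]
  rfl

lemma B_eq_all (req serv : List String) :
    check_exclusive_qualifiers_py_alt req serv =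
      (PySem.Set.ofList req).all (okB (PySem.Set.ofList req) (PySem.Set.ofList serv)) := rfl

lemma kw_backward : ∀ p ∈ pvEnum, ∀ w ∈ p.2, KW2GROUP.get? w = some p.1 := by decide

lemma enum_fun : ∀ p ∈ pvEnum, ∀ q ∈ pvEnum, p.1 = q.1 → p.2 = q.2 := by decide

lemma kw_forward (w : String) (i : Int) (h : KW2GROUP.get? w = some i) :
    ∃ p ∈ pvEnum, p.1 = i ∧ w ∈ p.2 := by
  unfold PySem.Dict.get? at h
  cases hf : List.find? (fun p => p.1 == w) KW2GROUP.items with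
  | none => rw [hf] at h; simp at h
  | some pr =>
      rw [hf] at h
      simp only [Option.map_some, Option.some.injEq] at h
      have hm := List.mem_of_find?_eq_some hf
      have hp := List.find?_some hf
      have hw : pr.1 = w := by simpa using hp
      have key : ∀ q ∈ KW2GROUP.items, ∃ p ∈ pvEnum, p.1 = q.2 ∧ q.1 ∈ p.2 := by decide
      obtain ⟨p, hpe, h1, h2⟩ := key pr hm
      exact ⟨p, hpe, by rw [h1, h], by rwa [hw] at h2⟩

lemma get_iff (p : Int × List String) (hp : p ∈ pvEnum) (w : String) :
    KW2GROUP.get? w = some p.1 ↔ w ∈ p.2 := by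
  constructor
  · intro h
    obtain ⟨q, hq, h1, h2⟩ := kw_forward w p.1 h
    rwa [enum_fun q hq p hp h1] at h2
  · intro h; exact kw_backward p hp w h

lemma count_eq (R : List String) (p : Int × List String) (hp : p ∈ pvEnum) :
    (R.filterMap (fun w => KW2GROUP.get? w)).count p.1 =
      (PySem.Set.inter R p.2).length := by
  rw [List.count_filterMap, List.countP_eq_length_filter]
  unfold PySem.Set.inter
  congr 1
  apply List.filter_congr
  intro w _
  by_cases h : w ∈ p.2
  · simp [PySem.Set.contains, List.contains_eq_mem, h, (get_iff p hp w).mpr h]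
  · have hne : KW2GROUP.get? w ≠ some p.1 := fun hc => h ((get_iff p hp w).mp hc)
    simp [PySem.Set.contains, List.contains_eq_mem, h, hne]

lemma inter_mem (R g : List String) (w : String) :
    w ∈ PySem.Set.inter R g ↔ w ∈ R ∧ w ∈ g := by
  unfold PySem.Set.inter
  simp [List.mem_filter, PySem.Set.contains, List.contains_eq_mem]

lemma serv_groups_iff (S : List String) (p : Int × List String) (hp : p ∈ pvEnum) :
    ((PySem.Set.ofList (S.filterMap (fun w => KW2GROUP.get? w))).contains p.1 = true ↔
      PySem.Set.inter S p.2 ≠ []) := by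
  rw [show ∀ s : PySem.Set Int, ∀ x, PySem.Set.contains s x = List.contains s x from fun _ _ => rfl,
      List.contains_eq_mem, decide_eq_true_eq, PySem.Set.mem_ofList, List.mem_filterMap]
  constructor
  · rintro ⟨v, hv, hg⟩
    intro hnil
    have : v ∈ PySem.Set.inter S p.2 := (inter_mem _ _ _).mpr ⟨hv, (get_iff p hp v).mp hg⟩
    simp [hnil] at this
  · intro hne
    obtain ⟨v, hv⟩ := List.exists_mem_of_ne_nil _ hne
    obtain ⟨h1, h2⟩ := (inter_mem _ _ _).mp hv
    exact ⟨v, h1, (get_iff p hp v).mpr h2⟩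

lemma okA_false_iff (R S : PySem.Set String) (g : List String) :
    okA R S g = false ↔
      (PySem.Set.inter R g).length = 1 ∧ PySem.Set.inter S g ≠ [] ∧
        PySem.Set.inter (PySem.Set.inter R g) (PySem.Set.inter S g) = [] := by
  unfold okA
  split_ifs with h1
  · simp only [false_iff]
    rintro ⟨h, _⟩; omega
  · rw [Bool.not_eq_false', Bool.and_eq_true, Bool.and_eq_true, Bool.not_eq_true',
        Bool.not_eq_true', List.isEmpty_eq_false_iff, List.isEmpty_eq_false_iff,
        List.isEmpty_iff]
    constructor
    · rintro ⟨⟨hr, hs⟩, hi⟩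
      have := List.length_pos_of_ne_nil hr
      exact ⟨by omega, hs, hi⟩
    · rintro ⟨hl, hs, hi⟩
      refine ⟨⟨?_, hs⟩, hi⟩
      intro hnil
      rw [hnil] at hl
      simp at hl

lemma okB_false_iff (req serv : List String) (p : Int × List String) (hp : p ∈ pvEnum)
    (w : String) (hget : KW2GROUP.get? w = some p.1) :
    okB (PySem.Set.ofList req) (PySem.Set.ofList serv) w = false ↔
      (PySem.Set.inter (PySem.Set.ofList req) p.2).length = 1 ∧
        PySem.Set.inter (PySem.Set.ofList serv) p.2 ≠ [] ∧
        w ∉ PySem.Set.ofList serv := by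
  simp only [okB, hget]
  rw [Bool.not_eq_false']
  rw [PySem.Dict.getD_foldl_modify_add_one]
  rw [show (PySem.Dict.mk ([] : List (Int × Int))).getD p.1 0 = 0 from rfl, zero_add,
      count_eq _ p hp]
  simp only [Bool.and_eq_true, beq_iff_eq, Bool.not_eq_true']
  rw [serv_groups_iff _ p hp]
  constructor
  · rintro ⟨⟨h1, h2⟩, h3⟩
    refine ⟨by omega, h2, ?_⟩
    simp only [show ∀ s : PySem.Set String, ∀ x, PySem.Set.contains s x = List.contains s x
        from fun _ _ => rfl, List.contains_eq_mem, decide_eq_false_iff_not] at h3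
    exact h3
  · rintro ⟨h1, h2, h3⟩
    refine ⟨⟨by omega, h2⟩, ?_⟩
    simp only [show ∀ s : PySem.Set String, ∀ x, PySem.Set.contains s x = List.contains s x
        from fun _ _ => rfl, List.contains_eq_mem, decide_eq_false_iff_not]
    exact h3

lemma main_eq (req serv : List String) :
    check_exclusive_qualifiers_py req serv = check_exclusive_qualifiers_py_alt req serv := by
  rw [A_eq_all, B_eq_all, Bool.eq_iff_iff, ← not_iff_not]
  simp only [Bool.not_eq_true, List.all_eq_false]
  constructor
  · -- a contradicting group yields a contradicting requirement keyword
    rintro ⟨p, hp, hok⟩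
    obtain ⟨hlen, hs, hi⟩ := (okA_false_iff _ _ _).mp hok
    obtain ⟨w, hw⟩ := List.length_eq_one_iff.mp hlen
    have hwmem : w ∈ PySem.Set.inter (PySem.Set.ofList req) p.2 := by simp [hw]
    obtain ⟨hwR, hwp⟩ := (inter_mem _ _ _).mp hwmem
    refine ⟨w, hwR, ?_⟩
    rw [okB_false_iff req serv p hp w ((get_iff p hp w).mpr hwp)]
    refine ⟨hlen, hs, ?_⟩
    intro hwS
    have : w ∈ PySem.Set.inter (PySem.Set.inter (PySem.Set.ofList req) p.2)
        (PySem.Set.inter (PySem.Set.ofList serv) p.2) :=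
      (inter_mem _ _ _).mpr ⟨hwmem, (inter_mem _ _ _).mpr ⟨hwS, hwp⟩⟩
    simp [hi] at this
  · -- a contradicting requirement keyword yields a contradicting group
    rintro ⟨w, hwR, hok⟩
    cases hget : KW2GROUP.get? w with
    | none =>
        simp only [okB, hget] at hok
        exact Bool.noConfusion hok
    | some i =>
        obtain ⟨p, hp, h1, hwp⟩ := kw_forward w i hget
        subst h1
        obtain ⟨hlen, hs, hwS⟩ := (okB_false_iff req serv p hp w hget).mp hok
        refine ⟨p, hp, ?_⟩
        rw [okA_false_iff]
        refine ⟨hlen, hs, ?_⟩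
        obtain ⟨a, ha⟩ := List.length_eq_one_iff.mp hlen
        have hwmem : w ∈ PySem.Set.inter (PySem.Set.ofList req) p.2 :=
          (inter_mem _ _ _).mpr ⟨hwR, hwp⟩
        have haw : a = w := by
          rw [ha] at hwmem
          exact (List.mem_singleton.mp hwmem).symm
        rw [ha] at hwmem
        rw [ha, haw]
        show List.filter
          (fun x => (PySem.Set.inter (PySem.Set.ofList serv) p.2).contains x) [w] = []
        rw [List.filter_eq_nil_iff]
        intro x hx hc
        rw [List.mem_singleton] at hx
        subst hx
        have hwmem2 : x ∈ PySem.Set.inter (PySem.Set.ofList serv) p.2 := by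
          simpa [PySem.Set.contains, List.contains_eq_mem] using hc
        exact hwS ((inter_mem _ _ _).mp hwmem2).1

-- ===== VERDICT (by name: the statement is the Claim_ definition above) =====
theorem check_exclusive_qualifiers_py_spec : Claim_equal_check_exclusive_qualifiers_py := by
  intro req serv _
  unfold Spec_check_exclusive_qualifiers_py
  exact main_eq req serv
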